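-- pv_equiv track=rewrite | github.com/Bridy902/CMEECourseWork | Week2/Code/align_seqs_better.py | find_best_alignments
-- ===== SOURCE A (Python) =====
-- def calculate_score(s1, s2, startpoint):
--     """Calculate alignment score and generate alignment representation."""
--     matched = ""
--     score = 0
--     l1, l2 = len(s1), len(s2)
--
--     for i in range(l2):
--         if (i + startpoint) < l1:
--             if s1[i + startpoint] == s2[i]:
--                 matched += "*"
--                 score += 1
--             else:
--                 matched += "-"
--
--     return matched, score
--
-- def find_best_alignments(s1, s2):
--     """Find all the best alignments for two sequences."""
--     best_alignments = []
--     my_best_score = -1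
--
--     for i in range(len(s1)):
--         matched, score = calculate_score(s1, s2, i)
--         if score > my_best_score:
--             best_alignments = [("." * i + s2, s1)]  # Start a new list of best alignments
--             my_best_score = score
--         elif score == my_best_score:
--             best_alignments.append(("." * i + s2, s1))  # Add to existing best alignments
--
--     return best_alignments, my_best_score
-- ===== SOURCE B (Python) =====
-- def find_best_alignments(s1, s2):
--     """Find all the best alignments for two sequences (per-symbol position
--     bucketing: one counts array over shifts, no inner rescan of s2 per shift)."""
--     l1 = len(s1)
--     if l1 == 0:
--         return [], -1
--     # positions of each character in s2
--     pos2 = {}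
--     for j, c in enumerate(s2):
--         pos2.setdefault(c, []).append(j)
--     # counts[i] = number of matches at shift i
--     counts = [0] * l1
--     for p1, c in enumerate(s1):
--         for p2 in pos2.get(c, []):
--             if p2 <= p1:
--                 counts[p1 - p2] += 1
--     best = max(counts)
--     return [("." * i + s2, s1) for i, sc in enumerate(counts) if sc == best], best
-- ===== Notes on version B (the rewrite author's own statement) =====
-- stated objective: alternative
-- what changed: B replaces A's per-shift rescans of s2 (calculate_score for every startpoint) by a single cross-correlation-style pass: it buckets the positions of each character of s2 in a dict, makes one pass over s1 accumulating match counts into a per-shift counts array, then takes max(counts) and collects the best shifts with one comprehension.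
import Mathlib
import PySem

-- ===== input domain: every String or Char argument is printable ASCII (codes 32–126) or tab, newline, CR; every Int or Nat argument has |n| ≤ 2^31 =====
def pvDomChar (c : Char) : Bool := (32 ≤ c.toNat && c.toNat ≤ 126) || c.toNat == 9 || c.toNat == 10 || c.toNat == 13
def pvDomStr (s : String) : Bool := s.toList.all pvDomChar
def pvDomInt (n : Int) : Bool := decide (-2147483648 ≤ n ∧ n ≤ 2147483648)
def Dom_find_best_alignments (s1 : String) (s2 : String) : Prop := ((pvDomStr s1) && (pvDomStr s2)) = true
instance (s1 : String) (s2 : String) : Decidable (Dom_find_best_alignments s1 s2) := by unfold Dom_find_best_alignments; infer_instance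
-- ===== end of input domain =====

-- B replaces A's per-shift rescans of s2 by one bucketing pass over s1 into a per-shift
-- counts array plus max(counts); equivalence of the two ports is proved on all inputs.

-- ===== PORT A =====

-- "." * i + s2   (shared by both ports: the same expression occurs in Source A and Source B)
def pvDots (i : Nat) (s2 : String) : String := String.ofList (List.replicate i '.' ++ s2.toList)

def calculate_score (c1 c2 : List Char) (startpoint : Int) : List Char × Int :=
  (PySem.List.pyRange 0 (c2.length : Int) 1).foldl
    (fun acc i =>
      if i + startpoint < (c1.length : Int) then
        if PySem.List.pyGetD c1 (i + startpoint) ' ' = PySem.List.pyGetD c2 i ' ' then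
          (acc.1 ++ ['*'], acc.2 + 1)
        else
          (acc.1 ++ ['-'], acc.2)
      else acc)
    (([] : List Char), (0 : Int))

def find_best_alignments (s1 : String) (s2 : String) : (List (String × String)) × Int :=
  (PySem.List.pyRange 0 (s1.toList.length : Int) 1).foldl
    (fun st i =>
      let ms := calculate_score s1.toList s2.toList i
      if ms.2 > st.2 then ([(pvDots i.toNat s2, s1)], ms.2)
      else if ms.2 = st.2 then (st.1 ++ [(pvDots i.toNat s2, s1)], st.2)
      else st)
    (([] : List (String × String)), (-1 : Int))

-- ===== PORT B =====

-- pos2: positions of each character of s2 (Python: pos2.setdefault(c, []).append(j))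
def pvPos2 (c2 : List Char) : PySem.Dict Char (List Int) :=
  (PySem.List.enumerate c2).foldl
    (fun d jc => PySem.Dict.modify d jc.2 [] (fun l => l ++ [jc.1]))
    PySem.Dict.empty

-- counts[i] = number of matches at shift i
def pvCountsLoop (c1 : List Char) (pos2 : PySem.Dict Char (List Int)) : List Int :=
  (PySem.List.enumerate c1).foldl
    (fun cnt pc =>
      (PySem.Dict.getD pos2 pc.2 []).foldl
        (fun cnt p2 =>
          if p2 ≤ pc.1 then
            PySem.List.pySetD cnt (pc.1 - p2) (PySem.List.pyGetD cnt (pc.1 - p2) 0 + 1)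
          else cnt)
        cnt)
    (List.replicate c1.length (0 : Int))

def find_best_alignments_alt (s1 : String) (s2 : String) : (List (String × String)) × Int :=
  let c1 := s1.toList
  if c1.length = 0 then ([], -1)
  else
    let counts := pvCountsLoop c1 (pvPos2 s2.toList)
    -- max(counts): counts is nonempty here, so the .getD default is never used
    let best := (PySem.List.max? counts (fun x => x)).getD 0
    ((PySem.List.enumerate counts).foldl
      (fun acc isc => if isc.2 = best then acc ++ [(pvDots isc.1.toNat s2, s1)] else acc)
      ([] : List (String × String)), best)

-- ===== PRECONDITION & SPEC =====
def Spec_find_best_alignments (s1 : String) (s2 : String) (out : (List (String × String)) × Int) : Prop := out = find_best_alignments_alt s1 s2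
instance (s1 : String) (s2 : String) (out : (List (String × String)) × Int) : Decidable (Spec_find_best_alignments s1 s2 out) := by unfold Spec_find_best_alignments; infer_instance

-- ===== CLAIM (what is proved, stated in full; the proofs are below) =====
def Claim_equal_find_best_alignments : Prop := ∀ (s1 : String) (s2 : String), Dom_find_best_alignments s1 s2 → Spec_find_best_alignments s1 s2 (find_best_alignments s1 s2)

-- ===== LEMMAS AND PROOFS =====

-- whether shift i matches at offset j
def pvHit (c1 c2 : List Char) (i j : Nat) : Bool :=
  decide (j + i < c1.length ∧ c1.getD (j + i) ' ' = c2.getD j ' ')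

-- the number of matches at shift i
def pvScore (c1 c2 : List Char) (i : Nat) : Int :=
  ((List.range c2.length).countP (pvHit c1 c2 i) : Int)

-- running best over shifts < n, starting from -1
def pvBest (c1 c2 : List Char) (n : Nat) : Int :=
  (List.range n).foldl (fun b i => max b (pvScore c1 c2 i)) (-1)

lemma pvScore_nonneg (c1 c2 : List Char) (i : Nat) : 0 ≤ pvScore c1 c2 i := by
  simp [pvScore]

lemma calc_score_aux (c1 c2 : List Char) (sp : Nat) (n : Nat) :
    ∀ (acc : List Char × Int),
    ((PySem.List.pyRange 0 (n : Int) 1).foldl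
      (fun acc i =>
        if i + (sp : Int) < (c1.length : Int) then
          if PySem.List.pyGetD c1 (i + (sp : Int)) ' ' = PySem.List.pyGetD c2 i ' ' then
            (acc.1 ++ ['*'], acc.2 + 1)
          else
            (acc.1 ++ ['-'], acc.2)
        else acc) acc).2
    = acc.2 + ((List.range n).countP (pvHit c1 c2 sp) : Int) := by
  induction n with
  | zero =>
      intro acc
      simp [PySem.List.pyRange_one_eq_nil (by omega : (0:Int) ≤ 0)]
  | succ n ih =>
      intro acc
      have hc : ((n + 1 : Nat) : Int) = (n : Int) + 1 := by push_cast; ring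
      rw [hc, PySem.List.pyRange_one_succ_right (by positivity), List.foldl_append]
      have hcast : (n : Int) + (sp : Int) = ((n + sp : Nat) : Int) := by push_cast; ring
      by_cases h1 : n + sp < c1.length
      · by_cases h2 : c1.getD (n + sp) ' ' = c2.getD n ' '
        · have hhit : pvHit c1 c2 sp n = true := decide_eq_true ⟨h1, h2⟩
          simp only [List.foldl_cons, List.foldl_nil, hcast,
            PySem.List.pyGetD_natCast, List.range_succ, List.countP_append,
            List.countP_cons, List.countP_nil, hhit,
            if_pos (show ((n + sp : Nat) : Int) < (c1.length : Int) by exact_mod_cast h1),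
            if_pos h2]
          rw [ih acc]; push_cast; ring
        · have hhit : pvHit c1 c2 sp n = false := decide_eq_false (fun h => h2 h.2)
          simp only [List.foldl_cons, List.foldl_nil, hcast,
            PySem.List.pyGetD_natCast, List.range_succ, List.countP_append,
            List.countP_cons, List.countP_nil, hhit,
            if_pos (show ((n + sp : Nat) : Int) < (c1.length : Int) by exact_mod_cast h1),
            if_neg h2]
          rw [ih acc]; push_cast; ring
      · have hhit : pvHit c1 c2 sp n = false := decide_eq_false (fun h => h1 h.1)
        simp only [List.foldl_cons, List.foldl_nil, hcast, List.range_succ,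
          List.countP_append, List.countP_cons, List.countP_nil, hhit,
          if_neg (show ¬ ((n + sp : Nat) : Int) < (c1.length : Int) by exact_mod_cast h1)]
        rw [ih acc]; push_cast; ring

lemma calc_score_eq (c1 c2 : List Char) (i : Nat) :
    (calculate_score c1 c2 (i : Int)).2 = pvScore c1 c2 i := by
  have := calc_score_aux c1 c2 i c2.length (([] : List Char), (0 : Int))
  simpa [calculate_score, pvScore] using this

lemma pvBest_succ (c1 c2 : List Char) (n : Nat) :
    pvBest c1 c2 (n + 1) = max (pvBest c1 c2 n) (pvScore c1 c2 n) := by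
  simp [pvBest, List.range_succ]

lemma le_pvBest (c1 c2 : List Char) {i n : Nat} (h : i < n) :
    pvScore c1 c2 i ≤ pvBest c1 c2 n := by
  induction n with
  | zero => omega
  | succ n ih =>
      rw [pvBest_succ]
      rcases Nat.lt_succ_iff_lt_or_eq.mp h with h' | h'
      · exact le_trans (ih h') (le_max_left _ _)
      · subst h'; exact le_max_right _ _

lemma A_fold_eq (s1 s2 : String) (n : Nat) :
    (PySem.List.pyRange 0 (n : Int) 1).foldl
      (fun st i =>
        let ms := calculate_score s1.toList s2.toList i
        if ms.2 > st.2 then ([(pvDots i.toNat s2, s1)], ms.2)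
        else if ms.2 = st.2 then (st.1 ++ [(pvDots i.toNat s2, s1)], st.2)
        else st)
      (([] : List (String × String)), (-1 : Int))
    = (((List.range n).filter
          (fun i => pvScore s1.toList s2.toList i = pvBest s1.toList s2.toList n)).map
          (fun i => (pvDots i s2, s1)),
       pvBest s1.toList s2.toList n) := by
  induction n with
  | zero =>
      simp [PySem.List.pyRange_one_eq_nil (by omega : (0:Int) ≤ 0), pvBest]
  | succ n ih =>
      have hc : ((n + 1 : Nat) : Int) = (n : Int) + 1 := by push_cast; ring
      rw [hc, PySem.List.pyRange_one_succ_right (by positivity), List.foldl_append, ih]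
      simp only [List.foldl_cons, List.foldl_nil, calc_score_eq s1.toList s2.toList n,
        Int.toNat_natCast]
      set c1 := s1.toList
      set c2 := s2.toList
      by_cases h1 : pvScore c1 c2 n > pvBest c1 c2 n
      · rw [if_pos h1]
        have hb : pvBest c1 c2 (n + 1) = pvScore c1 c2 n := by
          rw [pvBest_succ]; omega
        rw [hb]
        simp [List.range_succ, List.filter_append]
        intro i hi
        have := le_pvBest c1 c2 hi
        omega
      · rw [if_neg h1]
        by_cases h2 : pvScore c1 c2 n = pvBest c1 c2 n
        · rw [if_pos h2]
          have hb : pvBest c1 c2 (n + 1) = pvBest c1 c2 n := by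
            rw [pvBest_succ]; omega
          rw [hb]
          simp [List.range_succ, List.filter_append, h2]
        · rw [if_neg h2]
          have hb : pvBest c1 c2 (n + 1) = pvBest c1 c2 n := by
            rw [pvBest_succ]; omega
          rw [hb]
          simp [List.range_succ, List.filter_append, h2]

-- pos2 lookup characterisation
lemma pos2_aux (c : Char) : ∀ (l : List Char) (s : Int) (d : PySem.Dict Char (List Int)),
    ((PySem.List.enumerate l s).foldl
      (fun d jc => PySem.Dict.modify d jc.2 [] (fun t => t ++ [jc.1])) d).getD c []
    = d.getD c [] ++
        ((PySem.List.enumerate l s).filter (fun jc => jc.2 == c)).map (fun jc => jc.1) := by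
  intro l
  induction l with
  | nil => intro s d; simp [PySem.List.enumerate_nil]
  | cons x l ih =>
      intro s d
      rw [PySem.List.enumerate_cons]
      simp only [List.foldl_cons, List.filter_cons]
      rw [ih]
      by_cases hx : x = c
      · subst hx
        simp
      · rw [PySem.Dict.getD_modify]
        rw [if_neg (fun h => hx h.symm)]
        simp [hx]

lemma pos2_getD (c2 : List Char) (c : Char) :
    (pvPos2 c2).getD c [] =
      ((PySem.List.enumerate c2).filter (fun jc => jc.2 == c)).map (fun jc => jc.1) := by
  have := pos2_aux c c2 0 PySem.Dict.empty
  simpa [pvPos2] using this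

-- countP over a range of a predicate that pins its argument to x
lemma countP_range_pin (n x : Nat) (p : Nat → Bool) (hp : ∀ j, p j = true → j = x) :
    (List.range n).countP p = if x < n ∧ p x then 1 else 0 := by
  induction n with
  | zero => simp
  | succ n ih =>
      rw [List.range_succ, List.countP_append, ih]
      have hn : List.countP p [n] = if p n = true then 1 else 0 := by simp
      rw [hn]
      by_cases hx : p n = true
      · have hnx : n = x := hp n hx
        subst hnx
        have h1 : ¬ (n < n ∧ p n = true) := by omega
        rw [if_neg h1]
        simp [hx]
      · rw [if_neg hx, Nat.add_zero]
        have heq : (x < n ∧ p x = true) ↔ (x < n + 1 ∧ p x = true) := by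
          constructor
          · exact fun h => ⟨by omega, h.2⟩
          · intro h
            refine ⟨?_, h.2⟩
            rcases Nat.lt_succ_iff_lt_or_eq.mp h.1 with h' | h'
            · exact h'
            · exact absurd (h' ▸ h.2) hx
        rw [if_congr heq rfl rfl]

-- a sum of 0/1 indicators is a countP
lemma sum_ite_one (l : List Nat) (q : Nat → Prop) [DecidablePred q] :
    (l.map (fun k => if q k then (1 : Int) else 0)).sum
      = ((l.countP (fun k => decide (q k))) : Int) := by
  induction l with
  | nil => simp
  | cons a l ih =>
      by_cases h : q a <;> simp [ih, h, Int.add_comm]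

-- a bounded countP over a range shrinks the range
lemma countP_range_lt_and (a b : Nat) (t : Nat → Bool) :
    (List.range a).countP (fun j => decide (j < b) && t j)
      = (List.range (min a b)).countP t := by
  induction a with
  | zero => simp
  | succ a ih =>
      rw [List.range_succ, List.countP_append, ih]
      by_cases h : a < b
      · have hm : min (a + 1) b = min a b + 1 := by omega
        rw [hm, List.range_succ, List.countP_append]
        have hm2 : min a b = a := by omega
        simp [hm2, h]
      · have hm : min (a + 1) b = min a b := by omega
        simp [hm, h]

-- the inner loop: bucket increments, one character of s1
lemma inner_aux (p1 : Int) (L : List Int) : ∀ (cnt : List Int),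
    (∀ p2 ∈ L, 0 ≤ p2) → 0 ≤ p1 → p1 < (cnt.length : Int) →
    ((L.foldl (fun cnt p2 =>
        if p2 ≤ p1 then
          PySem.List.pySetD cnt (p1 - p2) (PySem.List.pyGetD cnt (p1 - p2) 0 + 1)
        else cnt) cnt).length = cnt.length
    ∧ ∀ i : Nat,
        PySem.List.pyGetD (L.foldl (fun cnt p2 =>
          if p2 ≤ p1 then
            PySem.List.pySetD cnt (p1 - p2) (PySem.List.pyGetD cnt (p1 - p2) 0 + 1)
          else cnt) cnt) (i : Int) 0
        = PySem.List.pyGetD cnt (i : Int) 0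
          + ((L.countP (fun p2 => decide (p2 ≤ p1 ∧ p1 - p2 = (i : Int)))) : Int)) := by
  induction L with
  | nil => intro cnt _ _ _; exact ⟨rfl, by simp⟩
  | cons p2 L ih =>
      intro cnt h0 hp1 hlen
      simp only [List.foldl_cons]
      have h2 : (0 : Int) ≤ p2 := h0 p2 List.mem_cons_self
      by_cases hle : p2 ≤ p1
      · rw [if_pos hle]
        have hlen' : (PySem.List.pySetD cnt (p1 - p2)
            (PySem.List.pyGetD cnt (p1 - p2) 0 + 1)).length = cnt.length :=
          PySem.List.length_pySetD _ _ _
        obtain ⟨ihl, ihg⟩ := ih _ (fun q hq => h0 q (List.mem_cons_of_mem _ hq)) hp1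
          (by rw [hlen']; exact hlen)
        refine ⟨by rw [ihl, hlen'], ?_⟩
        intro i
        rw [ihg i]
        have hcast : (((p1 - p2).toNat : Nat) : Int) = p1 - p2 := by omega
        have hnlt : (p1 - p2).toNat < cnt.length := by omega
        rw [show p1 - p2 = (((p1 - p2).toNat : Nat) : Int) from hcast.symm,
          PySem.List.pyGetD_pySetD_natCast cnt _ i _ 0 hnlt]
        rw [List.countP_cons]
        by_cases hi : i = (p1 - p2).toNat
        · subst hi
          have hcond : decide (p2 ≤ p1 ∧ p1 - p2 = (((p1 - p2).toNat : Nat) : Int)) = true :=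
            decide_eq_true ⟨hle, by omega⟩
          rw [if_pos rfl, hcond, hcast]
          simp only [if_pos rfl]
          push_cast
          ring
        · have hcond : decide (p2 ≤ p1 ∧ p1 - p2 = (i : Int)) = false := by
            apply decide_eq_false
            intro hc
            exact hi (by omega)
          rw [if_neg hi, hcond]
          simp
      · rw [if_neg hle]
        obtain ⟨ihl, ihg⟩ := ih cnt (fun q hq => h0 q (List.mem_cons_of_mem _ hq)) hp1 hlen
        refine ⟨ihl, ?_⟩
        intro i
        rw [ihg i, List.countP_cons]
        have hcond : decide (p2 ≤ p1 ∧ p1 - p2 = (i : Int)) = false :=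
          decide_eq_false (fun hc => hle hc.1)
        rw [hcond]
        push_cast
        ring

-- the outer loop over s1
lemma outer_aux (pos2 : PySem.Dict Char (List Int))
    (hpos : ∀ c p2, p2 ∈ pos2.getD c [] → (0 : Int) ≤ p2) :
    ∀ (l : List Char) (s : Int) (cnt : List Int), 0 ≤ s →
    s + l.length ≤ (cnt.length : Int) →
    (((PySem.List.enumerate l s).foldl
        (fun cnt pc =>
          (PySem.Dict.getD pos2 pc.2 []).foldl
            (fun cnt p2 =>
              if p2 ≤ pc.1 then
                PySem.List.pySetD cnt (pc.1 - p2) (PySem.List.pyGetD cnt (pc.1 - p2) 0 + 1)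
              else cnt)
            cnt) cnt).length = cnt.length
    ∧ ∀ i : Nat,
        PySem.List.pyGetD ((PySem.List.enumerate l s).foldl
          (fun cnt pc =>
            (PySem.Dict.getD pos2 pc.2 []).foldl
              (fun cnt p2 =>
                if p2 ≤ pc.1 then
                  PySem.List.pySetD cnt (pc.1 - p2) (PySem.List.pyGetD cnt (pc.1 - p2) 0 + 1)
                else cnt)
              cnt) cnt) (i : Int) 0
        = PySem.List.pyGetD cnt (i : Int) 0
          + ((PySem.List.enumerate l s).map (fun pc =>
              (((pos2.getD pc.2 []).countP
                  (fun p2 => decide (p2 ≤ pc.1 ∧ pc.1 - p2 = (i : Int)))) : Int))).sum) := by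
  intro l
  induction l with
  | nil => intro s cnt _ _; exact ⟨rfl, by simp [PySem.List.enumerate_nil]⟩
  | cons x l ih =>
      intro s cnt hs hlen
      rw [PySem.List.enumerate_cons]
      simp only [List.foldl_cons, List.map_cons, List.sum_cons, List.length_cons] at *
      obtain ⟨innl, inng⟩ := inner_aux s (pos2.getD x []) cnt
        (fun q hq => hpos x q hq) hs (by push_cast at hlen ⊢; omega)
      obtain ⟨ihl, ihg⟩ := ih (s + 1) _ (by omega) (by rw [innl]; push_cast at hlen ⊢; omega)
      refine ⟨by rw [ihl, innl], ?_⟩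
      intro i
      rw [ihg i, inng i]
      ring

-- reindexing shifts: counting matching source positions = counting matching offsets
lemma reindex (c1 c2 : List Char) (i : Nat) :
    (List.range c1.length).countP
      (fun k => decide (i ≤ k ∧ k - i < c2.length ∧ c2.getD (k - i) ' ' = c1.getD k ' '))
    = (List.range c2.length).countP (pvHit c1 c2 i) := by
  by_cases hi : i ≤ c1.length
  · have hsplit : c1.length = i + (c1.length - i) := by omega
    rw [hsplit, List.range_add, List.countP_append, List.countP_map]
    have h0 : (List.range i).countP
        (fun k => decide (i ≤ k ∧ k - i < c2.length ∧ c2.getD (k - i) ' ' = c1.getD k ' '))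
        = 0 := by
      apply List.countP_eq_zero.mpr
      intro k hk
      have hk' := List.mem_range.mp hk
      simp only [decide_eq_true_eq, not_and]
      omega
    rw [h0, Nat.zero_add]
    have hfun1 : ((fun k => decide (i ≤ k ∧ k - i < c2.length ∧
        c2.getD (k - i) ' ' = c1.getD k ' ')) ∘ (fun x => i + x))
        = fun j => decide (j < c2.length) &&
            decide (c2.getD j ' ' = c1.getD (i + j) ' ') := by
      funext j
      simp [Bool.decide_and]
    rw [hfun1, countP_range_lt_and]
    have hfun2 : pvHit c1 c2 i = fun j => decide (j < c1.length - i) &&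
        decide (c2.getD j ' ' = c1.getD (i + j) ' ') := by
      funext j
      simp only [pvHit]
      have hiff : (j + i < c1.length ∧ c1.getD (j + i) ' ' = c2.getD j ' ')
          ↔ (j < c1.length - i ∧ c2.getD j ' ' = c1.getD (i + j) ' ') := by
        constructor
        · rintro ⟨ha, hb⟩
          exact ⟨by omega, by rw [Nat.add_comm i j]; exact hb.symm⟩
        · rintro ⟨ha, hb⟩
          exact ⟨by omega, by rw [Nat.add_comm j i]; exact hb.symm⟩
      rw [decide_eq_decide.mpr hiff, Bool.decide_and]
    rw [hfun2, countP_range_lt_and, Nat.min_comm]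
  · have hL : (List.range c1.length).countP
        (fun k => decide (i ≤ k ∧ k - i < c2.length ∧ c2.getD (k - i) ' ' = c1.getD k ' '))
        = 0 := by
      apply List.countP_eq_zero.mpr
      intro k hk
      have hk' := List.mem_range.mp hk
      simp only [decide_eq_true_eq, not_and]
      omega
    have hR : (List.range c2.length).countP (pvHit c1 c2 i) = 0 := by
      apply List.countP_eq_zero.mpr
      intro j hj
      simp only [pvHit, decide_eq_true_eq, not_and]
      omega
    rw [hL, hR]

-- one term of the bucket sum
lemma term_eq (c1 c2 : List Char) (m k : Nat) :
    ((pvPos2 c2).getD (PySem.List.pyGetD c1 (m : Int) ' ') []).countP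
        (fun p2 => decide (p2 ≤ (m : Int) ∧ (m : Int) - p2 = (k : Int)))
    = if k ≤ m ∧ m - k < c2.length ∧ c2.getD (m - k) ' ' = c1.getD m ' ' then 1 else 0 := by
  rw [PySem.List.pyGetD_natCast, pos2_getD, List.countP_map, List.countP_filter]
  rw [PySem.List.enumerate_eq_map_pyRange c2 ' ']
  simp only [PySem.List.len_eq]
  rw [PySem.List.pyRange_zero_nat, List.map_map, List.countP_map]
  simp only [Function.comp_def]
  rw [countP_range_pin c2.length (m - k) _
    (by
      intro j hj
      simp only [Bool.and_eq_true, decide_eq_true_eq] at hj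
      omega)]
  simp only [Bool.and_eq_true, decide_eq_true_eq, beq_iff_eq, PySem.List.pyGetD_natCast]
  by_cases hc : k ≤ m ∧ m - k < c2.length ∧ c2.getD (m - k) ' ' = c1.getD m ' '
  · rw [if_pos hc, if_pos]
    exact ⟨hc.2.1, ⟨by omega, by omega⟩, hc.2.2⟩
  · rw [if_neg hc, if_neg]
    intro h
    exact hc ⟨by omega, h.1, h.2.2⟩

-- counts list characterisation
lemma counts_eq (c1 c2 : List Char) :
    pvCountsLoop c1 (pvPos2 c2) = (List.range c1.length).map (pvScore c1 c2) := by
  have hpos : ∀ c p2, p2 ∈ (pvPos2 c2).getD c [] → (0 : Int) ≤ p2 := by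
    intro c p2 hp
    rw [pos2_getD] at hp
    obtain ⟨jc, hjc, rfl⟩ := List.mem_map.mp hp
    have hmem := (List.mem_filter.mp hjc).1
    rw [PySem.List.mem_enumerate_iff] at hmem
    obtain ⟨q, hq, rfl⟩ := hmem
    simp
  obtain ⟨hlen, hget⟩ := outer_aux (pvPos2 c2) hpos c1 0 (List.replicate c1.length 0)
    le_rfl (by simp)
  have hLlen : (pvCountsLoop c1 (pvPos2 c2)).length = c1.length := by
    unfold pvCountsLoop
    rw [hlen, List.length_replicate]
  apply List.ext_getElem (by simp [hLlen])
  intro k h1 h2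
  have hK : k < c1.length := by simpa using h2
  have hval := hget k
  have hrepl : PySem.List.pyGetD (List.replicate c1.length (0 : Int)) (k : Int) 0 = 0 := by
    rw [PySem.List.pyGetD_natCast]
    simp
  have hen : PySem.List.enumerate c1 0 = (List.range c1.length).map
      (fun m : Nat => (((m : Int), PySem.List.pyGetD c1 (m : Int) ' '))) := by
    rw [PySem.List.enumerate_eq_map_pyRange c1 ' ']
    simp only [PySem.List.len_eq]
    rw [PySem.List.pyRange_zero_nat, List.map_map]
    rfl
  have hmapeq : ((List.range c1.length).map
      ((fun pc : Int × Char => (((pvPos2 c2).getD pc.2 []).countP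
          (fun p2 => decide (p2 ≤ pc.1 ∧ pc.1 - p2 = (k : Int))) : Int))
        ∘ (fun m : Nat => (((m : Int), PySem.List.pyGetD c1 (m : Int) ' ')))))
      = (List.range c1.length).map (fun m =>
          if k ≤ m ∧ m - k < c2.length ∧ c2.getD (m - k) ' ' = c1.getD m ' '
          then (1 : Int) else 0) := by
    apply List.map_congr_left
    intro m _
    simp only [Function.comp]
    rw [term_eq c1 c2 m k]
    split_ifs <;> simp
  have hcntP : ((List.range c1.length).countP (fun m =>
      decide (k ≤ m ∧ m - k < c2.length ∧ c2.getD (m - k) ' ' = c1.getD m ' ')))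
      = (List.range c2.length).countP (pvHit c1 c2 k) := reindex c1 c2 k
  have hsum : ((PySem.List.enumerate c1).map (fun pc =>
      (((pvPos2 c2).getD pc.2 []).countP
        (fun p2 => decide (p2 ≤ pc.1 ∧ pc.1 - p2 = (k : Int))) : Int))).sum
      = ((List.range c2.length).countP (pvHit c1 c2 k) : Int) := by
    rw [hen, List.map_map, hmapeq, sum_ite_one, hcntP]
  rw [hrepl, hsum, Int.zero_add] at hval
  have hgetelem : (pvCountsLoop c1 (pvPos2 c2))[k] =
      PySem.List.pyGetD (pvCountsLoop c1 (pvPos2 c2)) (k : Int) 0 := by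
    rw [PySem.List.pyGetD_natCast, List.getD_eq_getElem?_getD, List.getElem?_eq_getElem h1]
    rfl
  rw [hgetelem]
  have hfin : PySem.List.pyGetD (pvCountsLoop c1 (pvPos2 c2)) (k : Int) 0
      = pvScore c1 c2 k := by
    unfold pvCountsLoop
    rw [hval]
    rfl
  rw [hfin, List.getElem_map, List.getElem_range]

-- B's port, rewritten to the same canonical form as A's
lemma B_eq (s1 s2 : String) (h : ¬ s1.toList.length = 0) :
    find_best_alignments_alt s1 s2 =
      (((List.range s1.toList.length).filter
          (fun i => pvScore s1.toList s2.toList i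
              = pvBest s1.toList s2.toList s1.toList.length)).map
          (fun i => (pvDots i s2, s1)),
       pvBest s1.toList s2.toList s1.toList.length) := by
  unfold find_best_alignments_alt
  rw [if_neg h]
  dsimp only
  set c1 := s1.toList with hc1
  set c2 := s2.toList with hc2
  set l1 := c1.length with hl1
  rw [counts_eq c1 c2]
  set cnts := (List.range l1).map (pvScore c1 c2) with hcnts
  have hne : cnts ≠ [] := by
    simp [hcnts, List.map_eq_nil_iff, List.range_eq_nil, h]
  obtain ⟨x, t, hxt⟩ := List.exists_cons_of_ne_nil hne
  have hx0 : (0 : Int) ≤ x := by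
    have hxmem : x ∈ cnts := by rw [hxt]; exact List.mem_cons_self
    rw [hcnts] at hxmem
    obtain ⟨i, _, rfl⟩ := List.mem_map.mp hxmem
    exact pvScore_nonneg c1 c2 i
  have hbest : (PySem.List.max? cnts (fun x => x)).getD 0 = pvBest c1 c2 l1 := by
    rw [hxt, PySem.List.max?_id_cons, Option.getD_some]
    simp only [pvBest]
    have hfold : List.foldl (fun b i => max b (pvScore c1 c2 i)) (-1) (List.range l1)
        = List.foldl max (-1) cnts := by
      rw [hcnts, List.foldl_map]
    rw [hfold, hxt, List.foldl_cons, max_eq_right (by omega : (-1 : Int) ≤ x)]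
  rw [hbest]
  refine Prod.ext ?_ rfl
  simp only
  rw [PySem.List.foldl_append_ite
    (p := fun isc : Int × Int => isc.2 = pvBest c1 c2 l1)
    (f := fun isc : Int × Int => (pvDots isc.1.toNat s2, s1))]
  rw [List.nil_append]
  rw [PySem.List.enumerate_eq_map_pyRange cnts 0]
  simp only [PySem.List.len_eq, hcnts, List.length_map, List.length_range]
  rw [PySem.List.pyRange_zero_nat, List.map_map, List.filter_map, List.map_map]
  have hfil : (List.range l1).filter
      ((fun isc : Int × Int => decide (isc.2 = pvBest c1 c2 l1)) ∘
        ((fun j : Int => (j, PySem.List.pyGetD ((List.range l1).map (pvScore c1 c2)) j 0)) ∘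
          (fun k : Nat => (k : Int))))
      = (List.range l1).filter
          (fun i => pvScore c1 c2 i = pvBest c1 c2 l1) := by
    apply List.filter_congr
    intro j hj
    have hjl : j < l1 := List.mem_range.mp hj
    simp only [Function.comp, PySem.List.pyGetD_natCast, PySem.List.getD_map_range _ _ _ _ hjl]
  rw [hfil]
  apply List.map_congr_left
  intro j _
  simp only [Function.comp, Int.toNat_natCast]

-- ===== VERDICT (by name: the statement is the Claim_ definition above) =====
theorem find_best_alignments_spec : Claim_equal_find_best_alignments := by
  unfold Claim_equal_find_best_alignments
  intro s1 s2 _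
  unfold Spec_find_best_alignments
  by_cases h : s1.toList.length = 0
  · have hA : find_best_alignments s1 s2 = ([], -1) := by
      unfold find_best_alignments
      rw [h]
      simp [PySem.List.pyRange_one_eq_nil]
    have hB : find_best_alignments_alt s1 s2 = ([], -1) := by
      unfold find_best_alignments_alt
      simp [h]
    rw [hA, hB]
  · have hA := A_fold_eq s1 s2 s1.toList.length
    unfold find_best_alignments
    rw [hA, B_eq s1 s2 h]
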